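-- pv_equiv track=rewrite | github.com/berna1995/AdventOfCode | 2023/day10/solve2.py | intersection_points_r
-- ===== SOURCE A (Python) =====
-- def intersection_points_r(matrix, source_pt, polygon_pts) -> int:
--     src_row, src_col = source_pt
--     matrix_cols = len(matrix[0])
--     intersection_points = 0
--
--     for col in range(src_col, matrix_cols):
--         if (src_row, col) in polygon_pts:
--             if matrix[src_row][col] in ['J', 'L', '|']:
--                 intersection_points += 1
--
--     return intersection_points
-- ===== SOURCE B (Python) =====
-- def intersection_points_r(matrix, source_pt, polygon_pts) -> int:
--     src_row, src_col = source_pt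
--
--     def crossing(p):
--         r, c = p
--         return (r == src_row and src_col <= c < len(matrix[0])
--                 and matrix[src_row][c] in ('J', 'L', '|'))
--
--     return len(list(filter(crossing, polygon_pts)))
-- ===== Notes on version B (the rewrite author's own statement) =====
-- stated objective: alternative
-- what changed: B filters the polygon-point set by a crossing predicate (same row, column in [src_col, cols), cell is J/L/|) and returns the length of the filtered list, instead of A's loop over every column index of the row with a per-column set-membership test and a running counter.
import Mathlib
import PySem

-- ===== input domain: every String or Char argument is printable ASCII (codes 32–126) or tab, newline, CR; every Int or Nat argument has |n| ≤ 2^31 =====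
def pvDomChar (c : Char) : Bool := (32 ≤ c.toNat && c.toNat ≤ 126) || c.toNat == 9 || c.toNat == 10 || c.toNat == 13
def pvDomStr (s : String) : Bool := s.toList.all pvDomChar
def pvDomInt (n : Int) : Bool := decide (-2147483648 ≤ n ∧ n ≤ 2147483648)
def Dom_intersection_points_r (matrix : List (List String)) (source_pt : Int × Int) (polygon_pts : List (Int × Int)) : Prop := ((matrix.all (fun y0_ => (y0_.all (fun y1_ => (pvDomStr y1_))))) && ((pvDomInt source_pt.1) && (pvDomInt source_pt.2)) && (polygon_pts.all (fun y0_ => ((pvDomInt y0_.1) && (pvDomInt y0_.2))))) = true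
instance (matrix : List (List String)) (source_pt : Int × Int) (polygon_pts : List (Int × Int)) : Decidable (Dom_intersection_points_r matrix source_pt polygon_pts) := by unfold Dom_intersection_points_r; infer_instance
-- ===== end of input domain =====

-- B filters the polygon-point set by a crossing predicate and returns the filtered length,
-- instead of A's counter loop over the row's column indices with a membership test per column.
-- Objective: alternative decomposition.

-- ===== PORT A =====
def intersection_points_r (matrix : List (List String)) (source_pt : Int × Int) (polygon_pts : List (Int × Int)) : Int :=
  let src_row := source_pt.1
  let src_col := source_pt.2
  let matrix_cols : Int := ((PySem.List.pyGetD matrix 0 []).length : Int)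
  (PySem.List.pyRange src_col matrix_cols 1).foldl
    (fun intersection_points col =>
      if (src_row, col) ∈ polygon_pts then
        if PySem.List.pyGetD (PySem.List.pyGetD matrix src_row []) col "" ∈ (["J", "L", "|"] : List String) then
          intersection_points + 1
        else intersection_points
      else intersection_points)
    0

-- ===== PORT B =====
def pvCrossing (matrix : List (List String)) (src_row src_col : Int) (p : Int × Int) : Bool :=
  p.1 == src_row && decide (src_col ≤ p.2) &&
  decide (p.2 < ((PySem.List.pyGetD matrix 0 []).length : Int)) &&
  (["J", "L", "|"] : List String).contains
    (PySem.List.pyGetD (PySem.List.pyGetD matrix src_row []) p.2 "")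

def intersection_points_r_alt (matrix : List (List String)) (source_pt : Int × Int) (polygon_pts : List (Int × Int)) : Int :=
  ((polygon_pts.filter (pvCrossing matrix source_pt.1 source_pt.2)).length : Int)

-- ===== PRECONDITION & SPEC =====
-- Pre_ excludes exactly the inputs where the Python A raises an IndexError: an empty matrix
-- (len(matrix[0])) and any matching polygon point whose row or column access is out of range; it
-- also states that polygon_pts holds distinct elements — it is a Python set (set[tuple[int,int]]),
-- which the type convention represents as a list of DISTINCT pairs.
def Pre_intersection_points_r (matrix : List (List String)) (source_pt : Int × Int) (polygon_pts : List (Int × Int)) : Prop :=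
  matrix ≠ [] ∧ polygon_pts.Nodup ∧
  ∀ p ∈ polygon_pts, p.1 = source_pt.1 → source_pt.2 ≤ p.2 →
      p.2 < ((PySem.List.pyGetD matrix 0 []).length : Int) →
    PySem.Raise.InRange matrix.length source_pt.1 ∧
    PySem.Raise.InRange (PySem.List.pyGetD matrix source_pt.1 []).length p.2
instance (matrix : List (List String)) (source_pt : Int × Int) (polygon_pts : List (Int × Int)) : Decidable (Pre_intersection_points_r matrix source_pt polygon_pts) := by unfold Pre_intersection_points_r; infer_instance

def pvWitness_intersection_points_r : List (List String) × (Int × Int) × (List (Int × Int)) :=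
  ([["J", "-"], ["|", "L"]], (0, 0), [(0, 0), (1, 1)])

def Spec_intersection_points_r (matrix : List (List String)) (source_pt : Int × Int) (polygon_pts : List (Int × Int)) (out : Int) : Prop := out = intersection_points_r_alt matrix source_pt polygon_pts
instance (matrix : List (List String)) (source_pt : Int × Int) (polygon_pts : List (Int × Int)) (out : Int) : Decidable (Spec_intersection_points_r matrix source_pt polygon_pts out) := by unfold Spec_intersection_points_r; infer_instance

-- ===== CLAIM (what is proved, stated in full; the proofs are below) =====
def Claim_equal_intersection_points_r : Prop := ∀ (matrix : List (List String)) (source_pt : Int × Int) (polygon_pts : List (Int × Int)), Dom_intersection_points_r matrix source_pt polygon_pts → Pre_intersection_points_r matrix source_pt polygon_pts → Spec_intersection_points_r matrix source_pt polygon_pts (intersection_points_r matrix source_pt polygon_pts)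

-- ===== LEMMAS AND PROOFS =====

-- countP of a disjoint disjunction splits into a sum
lemma pv_countP_split {α : Type} (g h : α → Bool) :
    ∀ l : List α, (∀ x ∈ l, ¬(g x = true ∧ h x = true)) →
      l.countP (fun x => g x || h x) = l.countP g + l.countP h := by
  intro l
  induction l with
  | nil => intro _; simp
  | cons x xs ih =>
    intro hd
    simp only [List.countP_cons]
    rw [ih (fun y hy => hd y (List.mem_cons_of_mem x hy))]
    have := hd x (List.mem_cons_self)
    cases hg : g x <;> cases hh : h x <;> simp_all <;> omega

-- counting one fixed point along the column range
lemma pv_count_single (src_row src_col cols : Int) (q : Int → Prop) [DecidablePred q]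
    (p : Int × Int) :
    (PySem.List.pyRange src_col cols 1).countP (fun c => decide ((src_row, c) = p ∧ q c))
      = if p.1 = src_row ∧ src_col ≤ p.2 ∧ p.2 < cols ∧ q p.2 then 1 else 0 := by
  split_ifs with h
  · obtain ⟨h1, h2, h3, h4⟩ := h
    have hc : (PySem.List.pyRange src_col cols 1).countP (fun c => decide ((src_row, c) = p ∧ q c))
        = (PySem.List.pyRange src_col cols 1).count p.2 := by
      apply List.countP_congr
      intro c _
      simp only [decide_eq_true_eq, beq_iff_eq, Prod.ext_iff]
      constructor
      · rintro ⟨⟨-, hcp⟩, -⟩; exact hcp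
      · intro hcp
        subst hcp
        exact ⟨⟨h1.symm, rfl⟩, h4⟩
    rw [hc]
    exact List.count_eq_one_of_mem (PySem.List.nodup_pyRange_one src_col cols)
      (PySem.List.mem_pyRange_one.mpr ⟨h2, h3⟩)
  · apply List.countP_eq_zero.mpr
    intro c hc
    have hrange := PySem.List.mem_pyRange_one.mp hc
    simp only [decide_eq_true_eq, Prod.ext_iff, not_and]
    rintro ⟨he1, he2⟩ hq
    subst he2
    exact h ⟨he1.symm, hrange.1, hrange.2, hq⟩

-- the central count identity: scanning the columns and testing membership equals
-- scanning the (duplicate-free) point set and testing the column window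
lemma pv_count_key (src_row src_col cols : Int) (q : Int → Prop) [DecidablePred q] :
    ∀ pts : List (Int × Int), pts.Nodup →
      (PySem.List.pyRange src_col cols 1).countP (fun c => decide ((src_row, c) ∈ pts ∧ q c))
        = pts.countP (fun p => decide (p.1 = src_row ∧ src_col ≤ p.2 ∧ p.2 < cols ∧ q p.2)) := by
  intro pts
  induction pts with
  | nil => intro _; simp
  | cons p rest ih =>
    intro hnd
    have hp : p ∉ rest := (List.nodup_cons.mp hnd).1
    have hrest : rest.Nodup := (List.nodup_cons.mp hnd).2
    have hsplit : (PySem.List.pyRange src_col cols 1).countP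
          (fun c => decide ((src_row, c) ∈ p :: rest ∧ q c))
        = (PySem.List.pyRange src_col cols 1).countP (fun c => decide ((src_row, c) = p ∧ q c))
          + (PySem.List.pyRange src_col cols 1).countP (fun c => decide ((src_row, c) ∈ rest ∧ q c)) := by
      rw [← pv_countP_split (fun c => decide ((src_row, c) = p ∧ q c))
            (fun c => decide ((src_row, c) ∈ rest ∧ q c)) _ ?_]
      · apply List.countP_congr
        intro c _
        simp [List.mem_cons, or_and_right]
      · intro c _
        rintro ⟨h1, h2⟩
        simp only [decide_eq_true_eq] at h1 h2
        exact hp (h1.1 ▸ h2.1)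
    rw [hsplit, ih hrest, pv_count_single src_row src_col cols q p, List.countP_cons]
    simp only [decide_eq_true_eq]
    omega

-- B's crossing filter counts exactly the window predicate
lemma pv_filter_len (matrix : List (List String)) (src_row src_col : Int)
    (pts : List (Int × Int)) :
    (pts.filter (pvCrossing matrix src_row src_col)).length
      = pts.countP (fun p => decide (p.1 = src_row ∧ src_col ≤ p.2 ∧
          p.2 < ((PySem.List.pyGetD matrix 0 []).length : Int) ∧
          PySem.List.pyGetD (PySem.List.pyGetD matrix src_row []) p.2 "" ∈ (["J", "L", "|"] : List String))) := by
  rw [← List.countP_eq_length_filter]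
  apply List.countP_congr
  intro p _
  simp [pvCrossing, and_assoc]

-- ===== VERDICT (by name: the statement is the Claim_ definition above) =====
theorem intersection_points_r_spec : Claim_equal_intersection_points_r := by
  intro matrix source_pt polygon_pts _hdom hpre
  obtain ⟨-, hnd, -⟩ := hpre
  unfold Spec_intersection_points_r intersection_points_r intersection_points_r_alt
  simp only []
  have hA : (fun (acc : Int) (col : Int) =>
        if (source_pt.1, col) ∈ polygon_pts then
          if PySem.List.pyGetD (PySem.List.pyGetD matrix source_pt.1 []) col "" ∈ (["J", "L", "|"] : List String) then
            acc + 1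
          else acc
        else acc)
      = (fun (acc : Int) (col : Int) =>
        if (source_pt.1, col) ∈ polygon_pts ∧
            PySem.List.pyGetD (PySem.List.pyGetD matrix source_pt.1 []) col "" ∈ (["J", "L", "|"] : List String) then
          acc + 1
        else acc) := by
    funext acc col
    split_ifs <;> tauto
  rw [hA, PySem.List.foldl_ite_add_one, pv_filter_len]
  rw [pv_count_key source_pt.1 source_pt.2 ((PySem.List.pyGetD matrix 0 []).length : Int)
        (fun c => PySem.List.pyGetD (PySem.List.pyGetD matrix source_pt.1 []) c "" ∈ (["J", "L", "|"] : List String))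
        polygon_pts hnd]
  simp
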